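-- pv_equiv track=rewrite | github.com/anmorgunov/respa-data-analysis | tools.py | getNextCol
-- ===== SOURCE A (Python) =====
-- def getNextCol(col, prefix = None):
--     """Return the next column name after the given column name.
--
--     Args:
--         col (str): The column name to get the next column from.
--         prefix (str, optional): A prefix for the column name. Defaults to None.
--
--     Returns:
--         str: The next column name.
--     """
--     if prefix is None:
--         prefix = ''
--     strings = 'ABCDEFGHIJKLMNOPQRSTUVWXYZ'
--     if not col:
--         return 'A'
--     if len(col) == 1:
--         if col == 'Z':
--             return getNextCol(prefix, prefix=None) + getNextCol('', prefix=None)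
--         else:
--             return prefix + strings[strings.index(col)+1]
--     else:
--         return getNextCol(col[1:], prefix = prefix + col[0])
-- ===== SOURCE B (Python) =====
-- def getNextCol(col, prefix=None):
--     """Return the next column name after the given column name (iterative carry)."""
--     if not col:
--         return 'A'
--     strings = 'ABCDEFGHIJKLMNOPQRSTUVWXYZ'
--     chars = list((prefix or '') + col)
--     i = len(chars) - 1
--     while i >= 0 and chars[i] == 'Z':
--         chars[i] = 'A'
--         i -= 1
--     if i < 0:
--         return 'A' + ''.join(chars)
--     chars[i] = strings[strings.index(chars[i]) + 1]
--     return ''.join(chars)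
-- ===== Notes on version B (the rewrite author's own statement) =====
-- stated objective: simpler
-- what changed: A peels characters left-to-right via double recursion that re-enters itself on the accumulated prefix on carry; B concatenates prefix+col once and does a single iterative right-to-left carry pass over a char list.
-- outside the precondition, e.g. on getNextCol('a', None): A raises ValueError, B raises ValueError
import Mathlib
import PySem

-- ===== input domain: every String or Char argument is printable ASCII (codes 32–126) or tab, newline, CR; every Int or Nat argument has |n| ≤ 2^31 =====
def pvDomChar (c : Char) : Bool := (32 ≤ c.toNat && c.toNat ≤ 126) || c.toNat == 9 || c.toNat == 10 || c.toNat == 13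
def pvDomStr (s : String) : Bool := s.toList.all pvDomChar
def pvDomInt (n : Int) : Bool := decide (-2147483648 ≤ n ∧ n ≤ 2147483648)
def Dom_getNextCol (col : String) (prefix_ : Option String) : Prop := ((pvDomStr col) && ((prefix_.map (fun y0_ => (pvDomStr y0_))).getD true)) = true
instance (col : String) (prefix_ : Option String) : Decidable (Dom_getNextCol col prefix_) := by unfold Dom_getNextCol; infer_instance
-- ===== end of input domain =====

-- B replaces A's prefix-accumulating double recursion by one right-to-left carry pass
-- over the concatenated string (simpler; same return values, no mutation of arguments).

-- ===== PORT A =====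
-- strings = 'ABCDEFGHIJKLMNOPQRSTUVWXYZ'
def pvStrings : List Char := "ABCDEFGHIJKLMNOPQRSTUVWXYZ".toList

-- prefix + strings[strings.index(c)+1]; the '?' default is reached only when Python
-- raises ValueError/IndexError, which Pre_getNextCol excludes.
def pvNextChar (c : Char) : Char :=
  ((PySem.List.index? pvStrings c).bind
    (fun i => PySem.List.pyGet? pvStrings ((i : Int) + 1))).getD '?'

-- literal transliteration of A's recursion, on char lists (p = prefix)
def getNextColAux : (p : List Char) → (col : List Char) → List Char
  | _, [] => ['A']
  | p, [c] =>
      if c = 'Z' then getNextColAux [] p ++ getNextColAux [] []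
      else p ++ [pvNextChar c]
  | p, c :: rest => getNextColAux (p ++ [c]) rest
  termination_by p col => (p.length + col.length, col.length)
  decreasing_by all_goals simp_all; omega

def getNextCol (col : String) (prefix_ : Option String) : String :=
  String.mk (getNextColAux (prefix_.getD "").toList col.toList)

-- ===== PORT B =====
-- Source B's right-to-left carry loop, as structural recursion on the reversed char list:
-- 'Z' rolls to 'A' and carries left; past the leftmost char an 'A' is prepended.
def pvCarryRev : List Char → List Char
  | [] => ['A']
  | c :: rest => if c = 'Z' then 'A' :: pvCarryRev rest else pvNextChar c :: rest

def getNextCol_alt (col : String) (prefix_ : Option String) : String :=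
  if col.toList = [] then "A"
  else String.mk (pvCarryRev (((prefix_.getD "").toList ++ col.toList).reverse)).reverse

-- ===== PRECONDITION & SPEC =====
-- Pre_ excludes exactly the inputs where Python A raises ValueError: col nonempty and
-- the first character left of the trailing run of 'Z's in (prefix or '')+col is not in 'A'..'Y'.
def Pre_getNextCol (col : String) (prefix_ : Option String) : Prop :=
  col = "" ∨
    ((((prefix_.getD "").toList ++ col.toList).reverse.dropWhile (· = 'Z')).head?.all
      (fun c => 'A' ≤ c ∧ c ≤ 'Y') = true)
instance (col : String) (prefix_ : Option String) : Decidable (Pre_getNextCol col prefix_) := by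
  unfold Pre_getNextCol; infer_instance

def pvWitness_getNextCol : String × Option String := ("AZ", some "B")

def Spec_getNextCol (col : String) (prefix_ : Option String) (out : String) : Prop := out = getNextCol_alt col prefix_
instance (col : String) (prefix_ : Option String) (out : String) : Decidable (Spec_getNextCol col prefix_ out) := by unfold Spec_getNextCol; infer_instance

-- ===== CLAIM (what is proved, stated in full; the proofs are below) =====
def Claim_equal_getNextCol : Prop := ∀ (col : String) (prefix_ : Option String), Dom_getNextCol col prefix_ → Pre_getNextCol col prefix_ → Spec_getNextCol col prefix_ (getNextCol col prefix_)

-- ===== LEMMAS AND PROOFS =====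

-- Core bridge: A's accumulator recursion equals B's carry pass on p ++ col,
-- provided col is empty only when p is (the top-level 'col = "" -> return "A"' case).
theorem getNextColAux_eq (p col : List Char) (h : col = [] → p = []) :
    getNextColAux p col = (pvCarryRev ((p ++ col).reverse)).reverse := by
  match col with
  | [] => simp [h rfl, getNextColAux, pvCarryRev]
  | [c] =>
      by_cases hz : c = 'Z'
      · subst hz
        by_cases hp : p = []
        · subst hp; simp [getNextColAux, pvCarryRev]
        · rw [show getNextColAux p ['Z'] = getNextColAux [] p ++ getNextColAux [] [] from by
              simp [getNextColAux],
            getNextColAux_eq [] p (fun hc => absurd hc hp)]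
          simp [getNextColAux, pvCarryRev]
      · simp [getNextColAux, pvCarryRev, hz]
  | c :: d :: rest =>
      rw [show getNextColAux p (c :: d :: rest) = getNextColAux (p ++ [c]) (d :: rest) from by
            simp [getNextColAux],
          getNextColAux_eq (p ++ [c]) (d :: rest) (by simp)]
      simp
  termination_by (p.length + col.length, col.length)
  decreasing_by all_goals simp; omega

-- ===== VERDICT (by name: the statement is the Claim_ definition above) =====
theorem getNextCol_spec : Claim_equal_getNextCol := by
  intro col prefix_ _ _
  unfold Spec_getNextCol getNextCol getNextCol_alt
  by_cases hc : col.toList = []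
  · simp [hc, getNextColAux]; rfl
  · rw [if_neg hc, getNextColAux_eq _ _ (fun h => absurd h hc)]
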